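-- pv_equiv track=rewrite | github.com/smdelacruz/codewars | companyTest/kkbox_2.py | solution
-- ===== SOURCE A (Python) =====
-- def solution(S):
--     temp = ""
--     counter = 1
--     swap_counter = 0
--
--     for i in S:
--         if i!=temp:
--             temp = i
--             counter = 1
--         elif counter <= 2:
--             counter += 1
--             if counter >= 3:
--                 swap_counter += 1
--                 counter = 0
--     return swap_counter
-- ===== SOURCE B (Python) =====
-- from itertools import groupby
--
--
-- def solution(S):
--     return sum(len(list(g)) // 3 for _, g in groupby(S))
-- ===== Notes on version B (the rewrite author's own statement) =====
-- stated objective: idiomatic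
-- what changed: Replaces A's stateful per-character temp/counter loop with itertools.groupby run-length grouping and a closed-form len//3 per run.
import Mathlib
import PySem

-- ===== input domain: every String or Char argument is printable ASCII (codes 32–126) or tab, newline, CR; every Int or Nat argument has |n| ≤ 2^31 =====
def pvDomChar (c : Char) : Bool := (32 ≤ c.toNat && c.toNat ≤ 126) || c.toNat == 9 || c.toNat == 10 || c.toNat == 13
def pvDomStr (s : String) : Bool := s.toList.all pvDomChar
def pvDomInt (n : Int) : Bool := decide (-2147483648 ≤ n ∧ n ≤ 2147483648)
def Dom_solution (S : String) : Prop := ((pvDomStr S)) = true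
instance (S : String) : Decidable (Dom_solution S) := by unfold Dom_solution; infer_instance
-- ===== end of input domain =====

-- B replaces A's stateful per-character temp/counter loop with groupby-style run-length
-- grouping and a closed-form len // 3 per run (objective: idiomatic).

-- ===== PORT A =====
-- state = (temp, counter, swap_counter); one fold step per character of S
def solutionStep (st : String × Int × Int) (i : Char) : String × Int × Int :=
  if String.singleton i ≠ st.1 then
    (String.singleton i, 1, st.2.2)
  else if st.2.1 ≤ 2 then
    let counter' := st.2.1 + 1
    if counter' ≥ 3 then (st.1, 0, st.2.2 + 1) else (st.1, counter', st.2.2)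
  else st

def solution (S : String) : Int :=
  (S.toList.foldl solutionStep ("", 1, 0)).2.2

-- ===== PORT B =====
-- itertools.groupby: maximal runs of equal characters
def pvRuns : List Char → List (List Char)
  | [] => []
  | c :: cs =>
      (c :: cs.takeWhile (· = c)) :: pvRuns (cs.dropWhile (· = c))
termination_by l => l.length
decreasing_by
  simpa using Nat.lt_succ_of_le (List.length_dropWhile_le (· = c) cs)

-- sum(len(list(g)) // 3 for _, g in groupby(...)) over a character list
def pvBsum (l : List Char) : Int :=
  ((pvRuns l).map (fun g => PySem.Int.floordiv (g.length : Int) 3)).sum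

def solution_alt (S : String) : Int := pvBsum S.toList

-- ===== PRECONDITION & SPEC =====
def Spec_solution (S : String) (out : Int) : Prop := out = solution_alt S
instance (S : String) (out : Int) : Decidable (Spec_solution S out) := by unfold Spec_solution; infer_instance

-- ===== CLAIM (what is proved, stated in full; the proofs are below) =====
def Claim_equal_solution : Prop := ∀ (S : String), Dom_solution S → Spec_solution S (solution S)

-- ===== LEMMAS AND PROOFS =====

-- B's value with a pending run of char t whose already-consumed length is ≡ k (mod 3)
def pvBq (t : Char) (k : Int) (cs : List Char) : Int :=
  PySem.Int.floordiv (k + ((cs.takeWhile (· = t)).length : Int)) 3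
    + pvBsum (cs.dropWhile (· = t))

theorem pv_singleton_inj {a b : Char} (h : String.singleton a = String.singleton b) : a = b := by
  have := congrArg String.toList h
  simpa [String.singleton] using this

theorem pv_fd3 (n : Int) : PySem.Int.floordiv n 3 = n / 3 :=
  PySem.Int.floordiv_eq_ediv_of_pos (by norm_num)

theorem pvBsum_cons (c : Char) (cs : List Char) :
    pvBsum (c :: cs) =
      PySem.Int.floordiv (((cs.takeWhile (· = c)).length : Int) + 1) 3
        + pvBsum (cs.dropWhile (· = c)) := by
  simp only [pvBsum, pvRuns, List.map_cons, List.sum_cons, List.length_cons]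
  push_cast
  ring_nf

-- main invariant: the fold from state (singleton t, k, s) computes s plus the pending-run count
theorem pv_main (cs : List Char) : ∀ (t : Char) (k s : Int), 0 ≤ k → k ≤ 2 →
    (cs.foldl solutionStep (String.singleton t, k, s)).2.2 = s + pvBq t k cs := by
  induction cs with
  | nil =>
      intro t k s h0 h2
      simp only [List.foldl, pvBq, pvBsum, List.takeWhile, List.dropWhile, pvRuns]
      simp only [List.length_nil, List.map_nil, List.sum_nil, Nat.cast_zero, add_zero, pv_fd3]
      omega
  | cons c cs ih =>
      intro t k s h0 h2
      by_cases hct : c = t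
      · subst hct
        have hTW : ((c :: cs).takeWhile (· = c)) = c :: cs.takeWhile (· = c) := by
          simp [List.takeWhile]
        have hDW : ((c :: cs).dropWhile (· = c)) = cs.dropWhile (· = c) := by
          simp [List.dropWhile]
        by_cases hk : k = 2
        · -- counter reaches 3: swap, reset to 0
          subst hk
          have hstep : solutionStep (String.singleton c, 2, s) c
              = (String.singleton c, 0, s + 1) := by
            simp only [solutionStep]
            rw [if_neg (by simp), if_pos (by norm_num)]
            norm_num
          rw [List.foldl_cons, hstep, ih c 0 (s + 1) (by omega) (by omega)]
          simp only [pvBq, hTW, hDW, List.length_cons]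
          push_cast
          simp only [pv_fd3]
          omega
        · -- counter increments, no swap yet
          have hstep : solutionStep (String.singleton c, k, s) c
              = (String.singleton c, k + 1, s) := by
            simp only [solutionStep]
            rw [if_neg (by simp), if_pos h2]
            have hlt : ¬ (k + 1 ≥ 3) := by omega
            simp [hlt]
          rw [List.foldl_cons, hstep, ih c (k + 1) s (by omega) (by omega)]
          simp only [pvBq, hTW, hDW, List.length_cons]
          push_cast
          simp only [pv_fd3]
          omega
      · -- new run starts
        have hcond : String.singleton c ≠ String.singleton t := fun h => hct (pv_singleton_inj h)
        have hstep : solutionStep (String.singleton t, k, s) c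
            = (String.singleton c, 1, s) := by
          simp only [solutionStep]
          rw [if_pos hcond]
        rw [List.foldl_cons, hstep, ih c 1 s (by omega) (by omega)]
        have htW : (c :: cs).takeWhile (· = t) = [] := by simp [List.takeWhile, hct]
        have hdW : (c :: cs).dropWhile (· = t) = c :: cs := by simp [List.dropWhile, hct]
        simp only [pvBq, htW, hdW, List.length_nil, Nat.cast_zero, add_zero]
        rw [pvBsum_cons]
        simp only [pv_fd3]
        omega

theorem solution_eq_alt (S : String) : solution S = solution_alt S := by
  unfold solution solution_alt
  cases hS : S.toList with
  | nil => simp [pvBsum, pvRuns]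
  | cons c cs =>
      have hfirst : solutionStep ("", 1, 0) c = (String.singleton c, 1, 0) := by
        simp only [solutionStep]
        rw [if_pos]
        intro h
        have := congrArg String.toList h
        simp [String.singleton] at this
      rw [List.foldl_cons, hfirst, pv_main cs c 1 0 (by omega) (by omega)]
      rw [pvBsum_cons]
      simp only [pvBq]
      simp only [pv_fd3]
      omega

-- ===== VERDICT (by name: the statement is the Claim_ definition above) =====
theorem solution_spec : Claim_equal_solution := by
  intro S _
  unfold Spec_solution
  exact solution_eq_alt S
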